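-- pv_equiv track=rewrite | github.com/hieutran106/leetcode-ht | leetcode-python/_20xx/_2104_sum_subarray_range.py | count_min
-- ===== SOURCE A (Python) =====
-- from typing import List
--
-- def count_min(nums: List[int]):
--     l, r = [0] * len(nums), [0] * len(nums)
--     for i in range(len(nums)):
--         r[i] = len(nums) - i # r[i] distance between nums[i] and its next_less_element (NLE), including nums[i] and excluding NLE
--         l[i] = i + 1 # l[i] distance between nums[i] and its prev_less_element (PLE), including nums[i] and excluding PLE
--
--     stack = [] # using increasing stack
--     for i, n in enumerate(nums):
--         while stack and n < stack[-1][0]: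
--             item = stack.pop()
--             # nums[i] is the next less element of top item
--             r[item[1]] = i - item[1]
--         if stack:
--             # top is the prev less element of nums[i]
--             l[i] = i - stack[-1][1]
--         stack.append((n, i))
--
--     ans = [] # ans[i] is the number of subarrays in which nums[i] is the minimum
--     for i in range(len(nums)):
--         ans.append(l[i] * r[i])
--     return ans
-- ===== SOURCE B (Python) =====
-- def count_min(nums):
--     # For each i, directly scan for the nearest element <= nums[i] on the left
--     # (exclusive) and the nearest element < nums[i] on the right (exclusive).
--     n = len(nums)
--     ans = []
--     for i in range(n):
--         left = i
--         while left > 0 and nums[left - 1] > nums[i]: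
--             left -= 1
--         right = i
--         while right + 1 < n and nums[right + 1] >= nums[i]:
--             right += 1
--         ans.append((i - left + 1) * (right - i + 1))
--     return ans
-- ===== Notes on version B (the rewrite author's own statement) =====
-- stated objective: simpler
-- what changed: Replaced the fused monotonic-stack pass (which fills l and r arrays while popping) by a direct per-index scan: for each i walk left over elements > nums[i] and right over elements >= nums[i], multiplying the two window lengths; no stack and no auxiliary arrays.
import Mathlib
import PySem

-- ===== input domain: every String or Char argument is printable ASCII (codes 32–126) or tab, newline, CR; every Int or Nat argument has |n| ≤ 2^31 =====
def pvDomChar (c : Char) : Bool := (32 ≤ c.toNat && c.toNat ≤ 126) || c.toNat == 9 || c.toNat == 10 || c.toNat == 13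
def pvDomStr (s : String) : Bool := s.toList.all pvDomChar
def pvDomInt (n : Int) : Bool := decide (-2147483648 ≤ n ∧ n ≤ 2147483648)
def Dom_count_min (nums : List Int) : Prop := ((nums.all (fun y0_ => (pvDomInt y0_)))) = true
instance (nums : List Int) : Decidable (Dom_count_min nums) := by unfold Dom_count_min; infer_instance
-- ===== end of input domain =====

-- B replaces A's fused monotonic-stack pass by a direct per-index scan for the nearest
-- smaller-or-equal element on the left and strictly smaller element on the right
-- (simpler decomposition; not claimed faster).

-- ===== PORT A =====
-- the inner `while stack and n < stack[-1][0]` loop (pops and records r[item[1]] = i - item[1])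
def pvPop (i : Nat) (x : Int) : List (Int × Nat) → List Int → List (Int × Nat) × List Int
  | [], r => ([], r)
  | (v, j) :: st, r =>
    if x < v then pvPop i x st (r.set j ((i : Int) - (j : Int)))
    else ((v, j) :: st, r)

-- one iteration of `for i, n in enumerate(nums)`
def pvStepA (s : List Int × List Int × List (Int × Nat)) (p : Int × Nat) :
    List Int × List Int × List (Int × Nat) :=
  let res := pvPop p.2 p.1 s.2.2 s.2.1
  let l1 := match res.1 with
    | (_, j) :: _ => s.1.set p.2 ((p.2 : Int) - (j : Int))
    | [] => s.1
  (l1, res.2, (p.1, p.2) :: res.1)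

def count_min (nums : List Int) : List Int :=
  let n := nums.length
  -- `l, r = [0]*len(nums), [0]*len(nums)` then the first `for` loop filling r[i], l[i]
  let init := (List.range n).foldl
      (fun (p : List Int × List Int) i =>
        (p.1.set i ((i : Int) + 1), p.2.set i ((n : Int) - (i : Int))))
      (List.replicate n 0, List.replicate n 0)
  -- the stack loop
  let s := nums.zipIdx.foldl pvStepA (init.1, init.2, ([] : List (Int × Nat)))
  -- the final `ans.append(l[i] * r[i])` loop
  (List.range n).foldl (fun ans i => ans ++ [s.1.getD i 0 * s.2.1.getD i 0]) []

-- ===== PORT B =====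
-- `while left > 0 and nums[left-1] > nums[i]: left -= 1` (argument = current `left`)
def pvLeft (nums : List Int) (x : Int) : Nat → Nat
  | 0 => 0
  | left + 1 => if nums.getD left 0 > x then pvLeft nums x left else left + 1

-- `while right + 1 < n and nums[right+1] >= nums[i]: right += 1`
def pvRight (nums : List Int) (n : Nat) (x : Int) (right : Nat) : Nat :=
  if _h : right + 1 < n then
    if nums.getD (right + 1) 0 ≥ x then pvRight nums n x (right + 1) else right
  else right
termination_by n - right
decreasing_by omega

def count_min_alt (nums : List Int) : List Int :=
  let n := nums.length
  (List.range n).foldl (fun ans i =>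
    let left := pvLeft nums (nums.getD i 0) i
    let right := pvRight nums n (nums.getD i 0) i
    ans ++ [((i - left + 1 : Nat) : Int) * ((right - i + 1 : Nat) : Int)]) []

-- ===== PRECONDITION & SPEC =====
def Spec_count_min (nums : List Int) (out : List Int) : Prop := out = count_min_alt nums
instance (nums : List Int) (out : List Int) : Decidable (Spec_count_min nums out) := by unfold Spec_count_min; infer_instance

-- ===== CLAIM (what is proved, stated in full; the proofs are below) =====
def Claim_equal_count_min : Prop := ∀ (nums : List Int), Dom_count_min nums → Spec_count_min nums (count_min nums)

-- ===== LEMMAS AND PROOFS =====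

-- value at index j (all accesses in both programs are in range)
def pvA (nums : List Int) (j : Nat) : Int := nums.getD j 0

-- distance from i to the previous index with value ≤ nums[i] (i+1 if none)
def pvLspec (nums : List Int) (i : Nat) : Nat :=
  match (List.range i).reverse.find? (fun j => decide (pvA nums j ≤ pvA nums i)) with
  | some j => i - j
  | none => i + 1

-- distance from i to the next index with value < nums[i] (n - i if none)
def pvRspec (nums : List Int) (i : Nat) : Nat :=
  match (List.range' (i + 1) (nums.length - (i + 1))).find? (fun k => decide (pvA nums k < pvA nums i)) with
  | some k => k - i
  | none => nums.length - i

-- the common closed form both ports are proved equal to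
def pvOut (nums : List Int) : List Int :=
  (List.range nums.length).map (fun i => (pvLspec nums i : Int) * (pvRspec nums i : Int))

-- ---- generic list facts ----

theorem pv_foldl_append {α β : Type} (f : α → β) :
    ∀ (xs : List α) (acc : List β),
      xs.foldl (fun a i => a ++ [f i]) acc = acc ++ xs.map f := by
  intro xs
  induction xs with
  | nil => simp
  | cons x xs ih => intro acc; simp [List.foldl_cons, ih]

theorem pv_find?_rev_range_some {p : Nat → Bool} {k j : Nat}
    (h : (List.range k).reverse.find? p = some j) :
    j < k ∧ p j = true ∧ ∀ m, j < m → m < k → p m = false := by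
  induction k with
  | zero => simp at h
  | succ k ih =>
    rw [List.range_succ, List.reverse_append] at h
    simp [List.find?_cons] at h
    rcases hb : p k with _ | _
    · rw [hb] at h
      obtain ⟨hj, hpj, hmax⟩ := ih h
      exact ⟨by omega, hpj, fun m h1 h2 => by
        rcases Nat.lt_succ_iff_lt_or_eq.mp h2 with h'|h'
        · exact hmax m h1 h'
        · subst h'; exact hb⟩
    · rw [hb] at h
      cases h
      exact ⟨Nat.lt_succ_self _, hb, fun m h1 h2 => by omega⟩

theorem pv_find?_rev_range_eq_some {p : Nat → Bool} {k j : Nat}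
    (hj : j < k) (hpj : p j = true) (hmax : ∀ m, j < m → m < k → p m = false) :
    (List.range k).reverse.find? p = some j := by
  induction k with
  | zero => omega
  | succ k ih =>
    rw [List.range_succ, List.reverse_append]
    simp only [List.reverse_cons, List.reverse_nil, List.nil_append, List.cons_append,
      List.find?_cons]
    rcases Nat.lt_succ_iff_lt_or_eq.mp hj with h'|h'
    · have : p k = false := hmax k h' (Nat.lt_succ_self _)
      rw [this]
      exact ih h' (fun m h1 h2 => hmax m h1 (by omega))
    · subst h'; rw [hpj]

theorem pv_find?_range'_some {p : Nat → Bool} {s len t : Nat}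
    (h : (List.range' s len).find? p = some t) :
    s ≤ t ∧ t < s + len ∧ p t = true ∧ ∀ u, s ≤ u → u < t → p u = false := by
  induction len generalizing s with
  | zero => simp at h
  | succ len ih =>
    rw [List.range'_succ] at h
    rw [List.find?_cons] at h
    rcases hb : p s with _ | _
    · rw [hb] at h
      obtain ⟨h1, h2, h3, h4⟩ := ih h
      exact ⟨by omega, by omega, h3, fun u hu1 hu2 => by
        rcases Nat.eq_or_lt_of_le hu1 with h'|h'
        · subst h'; exact hb
        · exact h4 u h' hu2⟩
    · rw [hb] at h
      cases h
      exact ⟨le_refl _, by omega, hb, fun u h1 h2 => by omega⟩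

theorem pv_find?_range'_eq_some {p : Nat → Bool} {s len t : Nat}
    (h1 : s ≤ t) (h2 : t < s + len) (h3 : p t = true)
    (h4 : ∀ u, s ≤ u → u < t → p u = false) :
    (List.range' s len).find? p = some t := by
  induction len generalizing s with
  | zero => omega
  | succ len ih =>
    rw [List.range'_succ, List.find?_cons]
    rcases Nat.eq_or_lt_of_le h1 with h'|h'
    · subst h'; rw [h3]
    · have : p s = false := h4 s (le_refl _) h'
      rw [this]
      exact ih h' (by omega) (fun u hu1 hu2 => h4 u (by omega) hu2)

theorem pv_find?_range'_eq_none {p : Nat → Bool} {s len : Nat}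
    (h : ∀ u, s ≤ u → u < s + len → p u = false) :
    (List.range' s len).find? p = none := by
  apply List.find?_eq_none.mpr
  intro u hu
  rw [List.mem_range'_1] at hu
  simp [h u hu.1 hu.2]

-- ---- B-side: the two scans compute the closed form ----

theorem pvLeft_eq (nums : List Int) (x : Int) :
    ∀ l, pvLeft nums x l =
      match (List.range l).reverse.find? (fun j => decide (pvA nums j ≤ x)) with
      | some j => j + 1
      | none => 0 := by
  intro l
  induction l with
  | zero => simp [pvLeft]
  | succ l ih =>
    rw [List.range_succ, List.reverse_append]
    simp only [List.reverse_cons, List.reverse_nil, List.nil_append, List.cons_append,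
      List.find?_cons]
    have hdef : pvLeft nums x (l + 1) = if nums.getD l 0 > x then pvLeft nums x l else l + 1 := rfl
    by_cases h : nums.getD l 0 > x
    · have hd : decide (pvA nums l ≤ x) = false := by
        simp only [pvA, decide_eq_false_iff_not]; omega
      rw [hdef, if_pos h, hd]
      exact ih
    · have hd : decide (pvA nums l ≤ x) = true := by
        simp only [pvA, decide_eq_true_eq]; omega
      rw [hdef, if_neg h, hd]

theorem pvRight_eq (nums : List Int) (n : Nat) (x : Int) :
    ∀ right, right < n → pvRight nums n x right =
      match (List.range' (right + 1) (n - (right + 1))).find? (fun k => decide (pvA nums k < x)) with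
      | some k => k - 1
      | none => n - 1 := by
  have key : ∀ fuel right, n - right ≤ fuel → right < n →
      pvRight nums n x right =
        match (List.range' (right + 1) (n - (right + 1))).find?
            (fun k => decide (pvA nums k < x)) with
        | some k => k - 1
        | none => n - 1 := by
    intro fuel
    induction fuel with
    | zero => intro right h1 h2; omega
    | succ fuel ih =>
      intro right h1 h2
      rw [pvRight]
      by_cases hlt : right + 1 < n
      · have hrange : n - (right + 1) = (n - (right + 2)) + 1 := by omega
        rw [hrange, List.range'_succ, List.find?_cons]
        by_cases hd : nums.getD (right + 1) 0 ≥ x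
        · have hdec : decide (pvA nums (right + 1) < x) = false := by
            simp only [pvA, decide_eq_false_iff_not]; omega
          rw [dif_pos hlt, if_pos hd, hdec]
          exact ih (right + 1) (by omega) hlt
        · have hdec : decide (pvA nums (right + 1) < x) = true := by
            simp only [pvA, decide_eq_true_eq]; omega
          rw [dif_pos hlt, if_neg hd, hdec]
          simp
      · have hrange : n - (right + 1) = 0 := by omega
        rw [dif_neg hlt, hrange]
        simp only [List.range'_zero, List.find?_nil]
        show right = n - 1
        omega
  intro right h
  exact key (n - right) right (le_refl _) h

theorem pvB_elem (nums : List Int) (i : Nat) (hi : i < nums.length) :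
    ((i - pvLeft nums (nums.getD i 0) i + 1 : Nat) : Int) *
      ((pvRight nums nums.length (nums.getD i 0) i - i + 1 : Nat) : Int) =
      (pvLspec nums i : Int) * (pvRspec nums i : Int) := by
  have hx : nums.getD i 0 = pvA nums i := rfl
  rw [hx, pvLeft_eq, pvRight_eq nums nums.length (pvA nums i) i hi]
  unfold pvLspec pvRspec
  rcases hfl : (List.range i).reverse.find? (fun j => decide (pvA nums j ≤ pvA nums i)) with _ | j <;>
    rcases hfr : (List.range' (i + 1) (nums.length - (i + 1))).find?
        (fun k => decide (pvA nums k < pvA nums i)) with _ | k <;>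
    simp only []
  · rw [show i - 0 + 1 = i + 1 by omega,
      show nums.length - 1 - i + 1 = nums.length - i by omega]
  · obtain ⟨hk, -, -, -⟩ := pv_find?_range'_some hfr
    rw [show i - 0 + 1 = i + 1 by omega, show k - 1 - i + 1 = k - i by omega]
  · obtain ⟨hj, -, -⟩ := pv_find?_rev_range_some hfl
    rw [show i - (j + 1) + 1 = i - j by omega,
      show nums.length - 1 - i + 1 = nums.length - i by omega]
  · obtain ⟨hj, -, -⟩ := pv_find?_rev_range_some hfl
    obtain ⟨hk, -, -, -⟩ := pv_find?_range'_some hfr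
    rw [show i - (j + 1) + 1 = i - j by omega, show k - 1 - i + 1 = k - i by omega]

theorem count_min_alt_eq (nums : List Int) : count_min_alt nums = pvOut nums := by
  show (List.range nums.length).foldl
      (fun ans i => ans ++ [((i - pvLeft nums (nums.getD i 0) i + 1 : Nat) : Int) *
        ((pvRight nums nums.length (nums.getD i 0) i - i + 1 : Nat) : Int)]) [] = pvOut nums
  rw [pv_foldl_append (f := fun i => ((i - pvLeft nums (nums.getD i 0) i + 1 : Nat) : Int) *
        ((pvRight nums nums.length (nums.getD i 0) i - i + 1 : Nat) : Int))]
  rw [List.nil_append]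
  unfold pvOut
  apply List.map_congr_left
  intro i hi
  exact pvB_elem nums i (List.mem_range.mp hi)

-- ---- A-side machinery ----

-- Popped: some index strictly between j and i carries a smaller value
def pvPopped (nums : List Int) (i j : Nat) : Prop :=
  ∃ k, j < k ∧ k < i ∧ pvA nums k < pvA nums j

-- Surv: j's value is ≤ every value strictly between j and i (j still on the stack)
def pvSurv (nums : List Int) (i j : Nat) : Prop :=
  ∀ k, j < k → k < i → pvA nums j ≤ pvA nums k

theorem pv_not_popped_iff_surv (nums : List Int) (i j : Nat) :
    ¬ pvPopped nums i j ↔ pvSurv nums i j := by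
  constructor
  · intro h k h1 h2
    by_contra hc
    exact h ⟨k, h1, h2, by omega⟩
  · rintro h ⟨k, h1, h2, h3⟩
    have := h k h1 h2
    omega

-- the index stack (top first) after processing the first i elements
def pvS (nums : List Int) : Nat → List Nat
  | 0 => []
  | i + 1 => i :: (pvS nums i).filter (fun j => decide (pvA nums j ≤ pvA nums i))

theorem pvS_lt (nums : List Int) : ∀ i, ∀ j ∈ pvS nums i, j < i := by
  intro i
  induction i with
  | zero => simp [pvS]
  | succ i ih =>
    intro j hj
    simp only [pvS, List.mem_cons] at hj
    rcases hj with h|h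
    · omega
    · have := ih j (List.mem_of_mem_filter h); omega

theorem pvS_pairwise (nums : List Int) : ∀ i, (pvS nums i).Pairwise (· > ·) := by
  intro i
  induction i with
  | zero => simp [pvS]
  | succ i ih =>
    refine List.pairwise_cons.mpr ⟨?_, ih.filter _⟩
    intro j hj
    exact pvS_lt nums i j (List.mem_of_mem_filter hj)

theorem pvS_surv (nums : List Int) : ∀ i, ∀ j ∈ pvS nums i, pvSurv nums i j := by
  intro i
  induction i with
  | zero => simp [pvS]
  | succ i ih =>
    intro j hj
    simp only [pvS, List.mem_cons] at hj
    rcases hj with h|h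
    · subst h; intro k h1 h2; omega
    · have h1 := ih j (List.mem_of_mem_filter h)
      have h2 : pvA nums j ≤ pvA nums i := by
        have := List.of_mem_filter h; simpa using this
      intro k hk1 hk2
      rcases Nat.lt_succ_iff_lt_or_eq.mp hk2 with h'|h'
      · exact h1 k hk1 h'
      · subst h'; exact h2
    
theorem pvS_complete (nums : List Int) :
    ∀ i j, j < i → pvSurv nums i j → j ∈ pvS nums i := by
  intro i
  induction i with
  | zero => omega
  | succ i ih =>
    intro j hj hs
    simp only [pvS, List.mem_cons]
    rcases Nat.lt_succ_iff_lt_or_eq.mp hj with h'|h'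
    · right
      refine List.mem_filter.mpr ⟨ih j h' (fun k h1 h2 => hs k h1 (by omega)), ?_⟩
      simpa using hs i h' (Nat.lt_succ_self _)
    · left; omega

-- behaviour of the pop loop on a stack satisfying the invariant
theorem pvPop_spec (nums : List Int) (i : Nat) :
    ∀ (st : List Nat) (r : List Int),
      st.Pairwise (· > ·) →
      (∀ j ∈ st, j < i ∧ pvSurv nums i j) →
      r.length = nums.length →
      pvPop i (pvA nums i) (st.map (fun j => (pvA nums j, j))) r =
        ((st.filter (fun j => decide (pvA nums j ≤ pvA nums i))).map (fun j => (pvA nums j, j)),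
         (st.filter (fun j => decide (pvA nums i < pvA nums j))).foldl
           (fun r j => r.set j ((i : Int) - (j : Int))) r) := by
  intro st
  induction st with
  | nil => intro r _ _ _; simp [pvPop]
  | cons j st ih =>
    intro r hpw hmem hlen
    have hj := hmem j (List.mem_cons_self ..)
    have hstep : pvPop i (pvA nums i) ((j :: st).map (fun j => (pvA nums j, j))) r =
        if pvA nums i < pvA nums j then
          pvPop i (pvA nums i) (st.map (fun j => (pvA nums j, j)))
            (r.set j ((i : Int) - (j : Int)))
        else ((pvA nums j, j) :: st.map (fun j => (pvA nums j, j)), r) := rfl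
    by_cases hlt : pvA nums i < pvA nums j
    · have h1 : (decide (pvA nums j ≤ pvA nums i)) = false := by
        simp only [decide_eq_false_iff_not]; omega
      have h2 : (decide (pvA nums i < pvA nums j)) = true := by
        simp only [decide_eq_true_eq]; omega
      have hf1 : (j :: st).filter (fun m => decide (pvA nums m ≤ pvA nums i)) =
          st.filter (fun m => decide (pvA nums m ≤ pvA nums i)) := by
        rw [List.filter_cons, h1]; simp
      have hf2 : (j :: st).filter (fun m => decide (pvA nums i < pvA nums m)) =
          j :: st.filter (fun m => decide (pvA nums i < pvA nums m)) := by
        rw [List.filter_cons, h2]; simp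
      rw [hstep, if_pos hlt,
        ih (r.set j ((i : Int) - (j : Int))) (List.Pairwise.of_cons hpw)
          (fun m hm => hmem m (List.mem_cons_of_mem _ hm)) (by simp [hlen]),
        hf1, hf2, List.foldl_cons]
    · have hall : ∀ m ∈ st, pvA nums m ≤ pvA nums i := by
        intro m hm
        have hmj : j > m := List.rel_of_pairwise_cons hpw hm
        have := (hmem m (List.mem_cons_of_mem _ hm)).2 j hmj hj.1
        omega
      have h1 : (decide (pvA nums j ≤ pvA nums i)) = true := by
        simp only [decide_eq_true_eq]; omega
      have hf1 : (j :: st).filter (fun m => decide (pvA nums m ≤ pvA nums i)) = j :: st := by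
        rw [List.filter_cons, h1]
        simp only [if_true]
        congr 1
        apply List.filter_eq_self.mpr
        intro m hm; simp [hall m hm]
      have hf2 : (j :: st).filter (fun m => decide (pvA nums i < pvA nums m)) = [] := by
        apply List.filter_eq_nil_iff.mpr
        intro m hm
        rcases List.mem_cons.mp hm with h'|h'
        · subst h'; simp; omega
        · have := hall m h'; simp; omega
      rw [hstep, if_neg hlt, hf1, hf2, List.foldl_nil, List.map_cons]

-- the r-array produced by the pops, pointwise
theorem pvPop_r_getD (i : Nat) :
    ∀ (st : List Nat) (r : List Int), st.Pairwise (· > ·) → (∀ j ∈ st, j < r.length) →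
      ∀ m,
      ((st.foldl (fun r j => r.set j ((i : Int) - (j : Int))) r).getD m 0) =
        if m ∈ st then (i : Int) - (m : Int) else r.getD m 0 := by
  intro st
  induction st with
  | nil => intro r _ _ m; simp
  | cons j st ih =>
    intro r hpw hlen m
    rw [List.foldl_cons]
    rw [ih (r.set j ((i : Int) - (j : Int))) (List.Pairwise.of_cons hpw)
      (fun m hm => by simpa using hlen m (List.mem_cons_of_mem _ hm)) m]
    by_cases hm : m ∈ st
    · simp [hm, List.mem_cons_of_mem _ hm]
    · by_cases hmj : m = j
      · subst hmj
        have hlt : m < r.length := hlen m (List.mem_cons_self ..)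
        simp [hm, List.getD_eq_getElem?_getD, hlt]
      · simp only [if_neg hm]
        rw [List.getD_eq_getElem?_getD, List.getElem?_set_ne (fun h => hmj h.symm),
          ← List.getD_eq_getElem?_getD]
        simp [hm, hmj]

theorem pv_foldl_set_length (i : Nat) :
    ∀ (st : List Nat) (r : List Int),
      (st.foldl (fun r j => r.set j ((i : Int) - (j : Int))) r).length = r.length := by
  intro st
  induction st with
  | nil => intro r; rfl
  | cons j st ih => intro r; rw [List.foldl_cons, ih]; simp

-- any index m < i whose value is ≤ nums[i] is dominated by a surviving such index
theorem pv_surv_reach (nums : List Int) (i : Nat) :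
    ∀ d m, i - m ≤ d → m < i → pvA nums m ≤ pvA nums i →
      ∃ m', m ≤ m' ∧ m' < i ∧ m' ∈ pvS nums i ∧ pvA nums m' ≤ pvA nums i := by
  intro d
  induction d with
  | zero => intro m h1 h2 h3; omega
  | succ d ih =>
    intro m h1 h2 h3
    by_cases hs : pvSurv nums i m
    · exact ⟨m, le_refl _, h2, pvS_complete nums i m h2 hs, h3⟩
    · have hpp : pvPopped nums i m := by
        by_contra hpc
        exact hs ((pv_not_popped_iff_surv nums i m).mp hpc)
      obtain ⟨k, hk1, hk2, hk3⟩ := hpp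
      obtain ⟨m', hm1, hm2, hm3, hm4⟩ := ih k (by omega) hk2 (by omega)
      exact ⟨m', by omega, hm2, hm3, hm4⟩

-- weakening of pvPopped
theorem pvPopped_mono (nums : List Int) (i j : Nat) (h : pvPopped nums i j) :
    pvPopped nums (i + 1) j := by
  obtain ⟨k, h1, h2, h3⟩ := h
  exact ⟨k, h1, by omega, h3⟩

-- the r side of one step, pointwise
theorem pvR_new (nums : List Int) (i : Nat) (hi : i < nums.length) (r : List Int)
    (hr : r.length = nums.length)
    (hR : ∀ j < nums.length,
      (pvPopped nums i j → r.getD j 0 = (pvRspec nums j : Int)) ∧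
      (¬ pvPopped nums i j → r.getD j 0 = (nums.length : Int) - (j : Int))) :
    ∀ j < nums.length,
      (pvPopped nums (i + 1) j →
        (((pvS nums i).filter (fun m => decide (pvA nums i < pvA nums m))).foldl
          (fun r j => r.set j ((i : Int) - (j : Int))) r).getD j 0 = (pvRspec nums j : Int)) ∧
      (¬ pvPopped nums (i + 1) j →
        (((pvS nums i).filter (fun m => decide (pvA nums i < pvA nums m))).foldl
          (fun r j => r.set j ((i : Int) - (j : Int))) r).getD j 0 =
          (nums.length : Int) - (j : Int)) := by
  intro j hj
  have hpt := pvPop_r_getD i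
    ((pvS nums i).filter (fun m => decide (pvA nums i < pvA nums m))) r
    ((pvS_pairwise nums i).filter _)
    (fun m hm => by
      have := pvS_lt nums i m (List.mem_of_mem_filter hm); omega) j
  by_cases hj2 : j ∈ (pvS nums i).filter (fun m => decide (pvA nums i < pvA nums m))
  · have hjS := List.mem_of_mem_filter hj2
    have hjlt : pvA nums i < pvA nums j := by
      have := List.of_mem_filter hj2; simpa using this
    have hjI : j < i := pvS_lt nums i j hjS
    have hsurv : pvSurv nums i j := pvS_surv nums i j hjS
    have hfind : (List.range' (j + 1) (nums.length - (j + 1))).find?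
        (fun k => decide (pvA nums k < pvA nums j)) = some i := by
      apply pv_find?_range'_eq_some (by omega) (by omega)
        (by simp only [decide_eq_true_eq]; omega)
      intro u hu1 hu2
      have := hsurv u (by omega) (by omega)
      simp only [decide_eq_false_iff_not]; omega
    have hval : (pvRspec nums j : Int) = (i : Int) - (j : Int) := by
      unfold pvRspec
      rw [hfind]
      show ((i - j : Nat) : Int) = (i : Int) - (j : Int)
      omega
    constructor
    · intro _
      rw [hpt, if_pos hj2, hval]
    · intro hnp
      exact absurd ⟨i, hjI, by omega, hjlt⟩ hnp
  · rw [hpt, if_neg hj2]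
    by_cases hp : pvPopped nums i j
    · constructor
      · intro _; exact (hR j hj).1 hp
      · intro hnp; exact absurd (pvPopped_mono nums i j hp) hnp
    · have hnp1 : ¬ pvPopped nums (i + 1) j := by
        rintro ⟨k, hk1, hk2, hk3⟩
        rcases Nat.lt_succ_iff_lt_or_eq.mp hk2 with h'|h'
        · exact hp ⟨k, hk1, h', hk3⟩
        · have hk1' : j < i := h' ▸ hk1
          have hk3' : pvA nums i < pvA nums j := h' ▸ hk3
          have hsurv : pvSurv nums i j := (pv_not_popped_iff_surv nums i j).mp hp
          have hjS : j ∈ pvS nums i := pvS_complete nums i j hk1' hsurv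
          exact hj2 (List.mem_filter.mpr ⟨hjS, by simp only [decide_eq_true_eq]; omega⟩)
      constructor
      · intro hpp; exact absurd hpp hnp1
      · intro _; exact (hR j hj).2 hp
  
-- the full loop invariant
def pvInv (nums : List Int) (i : Nat) (s : List Int × List Int × List (Int × Nat)) : Prop :=
  s.1.length = nums.length ∧ s.2.1.length = nums.length ∧
  s.2.2 = (pvS nums i).map (fun j => (pvA nums j, j)) ∧
  (∀ j < nums.length, s.1.getD j 0 = if j < i then (pvLspec nums j : Int) else (j : Int) + 1) ∧
  (∀ j < nums.length,
    (pvPopped nums i j → s.2.1.getD j 0 = (pvRspec nums j : Int)) ∧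
    (¬ pvPopped nums i j → s.2.1.getD j 0 = (nums.length : Int) - (j : Int)))

theorem pvStepA_inv (nums : List Int) (i : Nat) (hi : i < nums.length)
    (s : List Int × List Int × List (Int × Nat)) (h : pvInv nums i s) :
    pvInv nums (i + 1) (pvStepA s (pvA nums i, i)) := by
  obtain ⟨hl, hr, hst, hL, hR⟩ := h
  have hpop : pvPop i (pvA nums i) s.2.2 s.2.1 =
      (((pvS nums i).filter (fun m => decide (pvA nums m ≤ pvA nums i))).map
          (fun j => (pvA nums j, j)),
       ((pvS nums i).filter (fun m => decide (pvA nums i < pvA nums m))).foldl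
          (fun r j => r.set j ((i : Int) - (j : Int))) s.2.1) := by
    rw [hst]
    exact pvPop_spec nums i (pvS nums i) s.2.1 (pvS_pairwise nums i)
      (fun j hj => ⟨pvS_lt nums i j hj, pvS_surv nums i j hj⟩) hr
  have hr1 := pvR_new nums i hi s.2.1 hr hR
  rcases hc : (pvS nums i).filter (fun m => decide (pvA nums m ≤ pvA nums i)) with _ | ⟨j₀, rest⟩
  · -- nothing on the stack is ≤ nums[i]: l is left unchanged
    have hnone : (List.range i).reverse.find?
        (fun j => decide (pvA nums j ≤ pvA nums i)) = none := by
      rcases hf : (List.range i).reverse.find? (fun j => decide (pvA nums j ≤ pvA nums i))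
        with _ | m
      · rfl
      · obtain ⟨hm1, hm2, _⟩ := pv_find?_rev_range_some hf
        simp only [decide_eq_true_eq] at hm2
        obtain ⟨m', _, _, hm'S, hm'le⟩ := pv_surv_reach nums i (i - m) m (le_refl _) hm1 hm2
        have : m' ∈ (pvS nums i).filter (fun m => decide (pvA nums m ≤ pvA nums i)) :=
          List.mem_filter.mpr ⟨hm'S, by simp only [decide_eq_true_eq]; omega⟩
        rw [hc] at this
        simp at this
    have hlsp : (pvLspec nums i : Int) = (i : Int) + 1 := by
      unfold pvLspec; rw [hnone]
      show ((i + 1 : Nat) : Int) = (i : Int) + 1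
      omega
    have hstepA : pvStepA s (pvA nums i, i) =
        (s.1,
         ((pvS nums i).filter (fun m => decide (pvA nums i < pvA nums m))).foldl
            (fun r j => r.set j ((i : Int) - (j : Int))) s.2.1,
         (pvA nums i, i) :: []) := by
      simp only [pvStepA, hpop, hc]
      simp
    rw [hstepA]
    refine ⟨hl, by rw [pv_foldl_set_length]; exact hr, ?_, ?_, ?_⟩
    · show (pvA nums i, i) :: [] = ((pvS nums (i + 1)).map (fun j => (pvA nums j, j)))
      simp only [pvS, List.map_cons, hc, List.map_nil]
    · intro j hj
      rcases Nat.lt_trichotomy j i with h'|h'|h'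
      · have := hL j hj
        rw [if_pos h'] at this
        rw [this, if_pos (by omega)]
      · subst h'
        have := hL j hj
        rw [if_neg (by omega)] at this
        rw [this, if_pos (by omega), hlsp]
      · have := hL j hj
        rw [if_neg (by omega)] at this
        rw [this, if_neg (by omega)]
    · exact hr1
  · -- the top of the popped stack is the closest index with value ≤ nums[i]
    have hj₀F : j₀ ∈ (pvS nums i).filter (fun m => decide (pvA nums m ≤ pvA nums i)) := by
      rw [hc]; exact List.mem_cons_self ..
    have hj₀S : j₀ ∈ pvS nums i := List.mem_of_mem_filter hj₀F
    have hj₀le : pvA nums j₀ ≤ pvA nums i := by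
      have := List.of_mem_filter hj₀F; simpa using this
    have hj₀lt : j₀ < i := pvS_lt nums i j₀ hj₀S
    have hmax : ∀ m, j₀ < m → m < i → ¬ (pvA nums m ≤ pvA nums i) := by
      intro m hm1 hm2 hmle
      obtain ⟨m', hm'1, hm'2, hm'S, hm'le⟩ := pv_surv_reach nums i (i - m) m (le_refl _) hm2 hmle
      have hm'F : m' ∈ (pvS nums i).filter (fun m => decide (pvA nums m ≤ pvA nums i)) :=
        List.mem_filter.mpr ⟨hm'S, by simp only [decide_eq_true_eq]; omega⟩
      have hpwF := (pvS_pairwise nums i).filter (fun m => decide (pvA nums m ≤ pvA nums i))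
      rw [hc] at hm'F hpwF
      rcases List.mem_cons.mp hm'F with h'|h'
      · omega
      · have : j₀ > m' := List.rel_of_pairwise_cons hpwF h'
        omega
    have hsome : (List.range i).reverse.find?
        (fun j => decide (pvA nums j ≤ pvA nums i)) = some j₀ := by
      apply pv_find?_rev_range_eq_some hj₀lt (by simp only [decide_eq_true_eq]; omega)
      intro m hm1 hm2
      have := hmax m hm1 hm2
      simp only [decide_eq_false_iff_not]; omega
    have hlsp : (pvLspec nums i : Int) = (i : Int) - (j₀ : Int) := by
      unfold pvLspec; rw [hsome]
      show ((i - j₀ : Nat) : Int) = (i : Int) - (j₀ : Int)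
      omega
    have hstepA : pvStepA s (pvA nums i, i) =
        (s.1.set i ((i : Int) - (j₀ : Int)),
         ((pvS nums i).filter (fun m => decide (pvA nums i < pvA nums m))).foldl
            (fun r j => r.set j ((i : Int) - (j : Int))) s.2.1,
         (pvA nums i, i) :: (j₀ :: rest).map (fun j => (pvA nums j, j))) := by
      simp only [pvStepA, hpop, hc]
      simp
    rw [hstepA]
    refine ⟨by simp [hl], by rw [pv_foldl_set_length]; exact hr, ?_, ?_, ?_⟩
    · show _ = (pvS nums (i + 1)).map (fun j => (pvA nums j, j))
      simp only [pvS, List.map_cons, hc]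
    · intro j hj
      by_cases h' : j = i
      · subst h'
        rw [List.getD_eq_getElem?_getD, List.getElem?_set, if_pos rfl, if_pos (by omega)]
        rw [if_pos (by omega), hlsp]
        simp
      · rw [List.getD_eq_getElem?_getD, List.getElem?_set_ne (fun h => h' h.symm),
          ← List.getD_eq_getElem?_getD]
        have := hL j hj
        rcases Nat.lt_or_ge j i with h''|h''
        · rw [if_pos h''] at this
          rw [this, if_pos (by omega)]
        · rw [if_neg (by omega)] at this
          rw [this, if_neg (by omega)]
    · exact hr1

theorem pv_fold_inv (nums : List Int) :
    ∀ (k : Nat) (s : List Int × List Int × List (Int × Nat)), k ≤ nums.length →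
      pvInv nums k s →
      pvInv nums nums.length (((nums.drop k).zipIdx k).foldl pvStepA s) := by
  have key : ∀ fuel k s, nums.length - k ≤ fuel → k ≤ nums.length → pvInv nums k s →
      pvInv nums nums.length (((nums.drop k).zipIdx k).foldl pvStepA s) := by
    intro fuel
    induction fuel with
    | zero =>
      intro k s h1 h2 h3
      have hk : k = nums.length := by omega
      subst hk
      rw [List.drop_length]
      exact h3
    | succ fuel ih =>
      intro k s h1 h2 h3
      by_cases hk : k < nums.length
      · rw [List.drop_eq_getElem_cons hk, List.zipIdx_cons, List.foldl_cons]
        have hx : nums[k] = pvA nums k := (List.getD_eq_getElem nums 0 hk).symm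
        rw [hx]
        exact ih (k + 1) _ (by omega) (by omega) (pvStepA_inv nums k hk s h3)
      · have hk' : k = nums.length := by omega
        subst hk'
        rw [List.drop_length]
        exact h3
  intro k s h1 h2
  exact key (nums.length - k) k s (le_refl _) h1 h2

theorem pv_init_inv (nums : List Int) :
    pvInv nums 0
      (((List.range nums.length).foldl
        (fun (p : List Int × List Int) i =>
          (p.1.set i ((i : Int) + 1), p.2.set i ((nums.length : Int) - (i : Int))))
        (List.replicate nums.length 0, List.replicate nums.length 0)).1,
       ((List.range nums.length).foldl
        (fun (p : List Int × List Int) i =>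
          (p.1.set i ((i : Int) + 1), p.2.set i ((nums.length : Int) - (i : Int))))
        (List.replicate nums.length 0, List.replicate nums.length 0)).2,
       ([] : List (Int × Nat))) := by
  have key : ∀ t, t ≤ nums.length →
      (((List.range t).foldl
        (fun (p : List Int × List Int) i =>
          (p.1.set i ((i : Int) + 1), p.2.set i ((nums.length : Int) - (i : Int))))
        (List.replicate nums.length 0, List.replicate nums.length 0)).1.length = nums.length ∧
       ((List.range t).foldl
        (fun (p : List Int × List Int) i =>
          (p.1.set i ((i : Int) + 1), p.2.set i ((nums.length : Int) - (i : Int))))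
        (List.replicate nums.length 0, List.replicate nums.length 0)).2.length = nums.length ∧
       ∀ j < nums.length,
         (((List.range t).foldl
            (fun (p : List Int × List Int) i =>
              (p.1.set i ((i : Int) + 1), p.2.set i ((nums.length : Int) - (i : Int))))
            (List.replicate nums.length 0, List.replicate nums.length 0)).1.getD j 0 =
            if j < t then (j : Int) + 1 else 0) ∧
         (((List.range t).foldl
            (fun (p : List Int × List Int) i =>
              (p.1.set i ((i : Int) + 1), p.2.set i ((nums.length : Int) - (i : Int))))
            (List.replicate nums.length 0, List.replicate nums.length 0)).2.getD j 0 =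
            if j < t then (nums.length : Int) - (j : Int) else 0)) := by
    intro t
    induction t with
    | zero =>
      intro _
      refine ⟨by simp, by simp, fun j hj => ⟨?_, ?_⟩⟩ <;>
        simp [List.getD_eq_getElem?_getD, hj]
    | succ t ih =>
      intro ht
      obtain ⟨ih1, ih2, ih3⟩ := ih (by omega)
      rw [List.range_succ, List.foldl_append, List.foldl_cons, List.foldl_nil]
      have htlt : t < nums.length := by omega
      refine ⟨by simp [ih1], by simp [ih2], fun j hj => ⟨?_, ?_⟩⟩
      · by_cases h' : j = t
        · subst h'
          rw [List.getD_eq_getElem?_getD, List.getElem?_set, if_pos rfl, if_pos (by omega),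
            if_pos (by omega)]
          simp
        · rw [List.getD_eq_getElem?_getD, List.getElem?_set_ne (fun h => h' h.symm),
            ← List.getD_eq_getElem?_getD, (ih3 j hj).1]
          by_cases h'' : j < t
          · rw [if_pos h'', if_pos (by omega)]
          · rw [if_neg h'', if_neg (by omega)]
      · by_cases h' : j = t
        · subst h'
          rw [List.getD_eq_getElem?_getD, List.getElem?_set, if_pos rfl, if_pos (by omega),
            if_pos (by omega)]
          simp
        · rw [List.getD_eq_getElem?_getD, List.getElem?_set_ne (fun h => h' h.symm),
            ← List.getD_eq_getElem?_getD, (ih3 j hj).2]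
          by_cases h'' : j < t
          · rw [if_pos h'', if_pos (by omega)]
          · rw [if_neg h'', if_neg (by omega)]
  obtain ⟨h1, h2, h3⟩ := key nums.length (le_refl _)
  refine ⟨h1, h2, rfl, fun j hj => ?_, fun j hj => ?_⟩
  · rw [(h3 j hj).1, if_pos hj, if_neg (by omega)]
  · refine ⟨fun hp => ?_, fun _ => ?_⟩
    · obtain ⟨k, hk1, hk2, -⟩ := hp; omega
    · rw [(h3 j hj).2, if_pos hj]

-- the final ans-building loop over any state satisfying the end invariant
theorem pv_final (nums : List Int) (S : List Int × List Int × List (Int × Nat))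
    (hinv : pvInv nums nums.length S) :
    (List.range nums.length).foldl (fun ans i => ans ++ [S.1.getD i 0 * S.2.1.getD i 0]) [] =
      pvOut nums := by
  obtain ⟨-, -, -, hL, hR⟩ := hinv
  rw [pv_foldl_append (f := fun i => S.1.getD i 0 * S.2.1.getD i 0), List.nil_append]
  unfold pvOut
  apply List.map_congr_left
  intro i hi
  have hin := List.mem_range.mp hi
  have hLi := hL i hin
  rw [if_pos hin] at hLi
  rw [hLi]
  by_cases hp : pvPopped nums nums.length i
  · rw [(hR i hin).1 hp]
  · rw [(hR i hin).2 hp]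
    have hnone : (List.range' (i + 1) (nums.length - (i + 1))).find?
        (fun k => decide (pvA nums k < pvA nums i)) = none := by
      apply pv_find?_range'_eq_none
      intro u hu1 hu2
      simp only [decide_eq_false_iff_not]
      intro hlt
      exact hp ⟨u, by omega, by omega, hlt⟩
    have : (pvRspec nums i : Int) = (nums.length : Int) - (i : Int) := by
      unfold pvRspec
      rw [hnone]
      show ((nums.length - i : Nat) : Int) = (nums.length : Int) - (i : Int)
      omega
    rw [this]

theorem count_min_eq (nums : List Int) : count_min nums = pvOut nums := by
  have hinv := pv_fold_inv nums 0 _ (Nat.zero_le _) (pv_init_inv nums)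
  rw [List.drop_zero] at hinv
  exact pv_final nums _ hinv

-- ===== VERDICT (by name: the statement is the Claim_ definition above) =====
theorem count_min_spec : Claim_equal_count_min := by
  intro nums _
  unfold Spec_count_min
  rw [count_min_eq, count_min_alt_eq]
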